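-- pv_equiv track=rewrite | github.com/iyarzaks/scheduling_with_petri_nets | extract_problems/extract_problem.py | parse_resource_availabilities
-- ===== SOURCE A (Python) =====
-- def parse_resource_availabilities(table_data):
--     resources = {}
--     headers = table_data[0].split("  ")
--     for line in table_data[1:]:
--         parts = line.split()
--         if len(parts) > 1:
--             for i in range(len(headers)):
--                 if headers[i].startswith("R"):
--                     resource_name = headers[i]
--                     resource_amount = int(parts[i])
--                     resources[resource_name.replace(" ", "")] = resource_amount
--     return resources
-- ===== SOURCE B (Python) =====
-- def parse_resource_availabilities(table_data):
--     headers = table_data[0].split("  ")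
--     last = None
--     for line in table_data[1:]:
--         parts = line.split()
--         if len(parts) > 1:
--             last = parts
--     if last is None:
--         return {}
--     return {h.replace(" ", ""): int(last[i])
--             for i, h in enumerate(headers) if h.startswith("R")}
-- ===== Notes on version B (the rewrite author's own statement) =====
-- stated objective: alternative
-- what changed: B exploits that every qualifying data line overwrites exactly the same keys, so instead of building and repeatedly overwriting a dict per line it scans once for the LAST line with more than one field and builds the result dict from that single line; the dict-accumulation over lines disappears.
import Mathlib
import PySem

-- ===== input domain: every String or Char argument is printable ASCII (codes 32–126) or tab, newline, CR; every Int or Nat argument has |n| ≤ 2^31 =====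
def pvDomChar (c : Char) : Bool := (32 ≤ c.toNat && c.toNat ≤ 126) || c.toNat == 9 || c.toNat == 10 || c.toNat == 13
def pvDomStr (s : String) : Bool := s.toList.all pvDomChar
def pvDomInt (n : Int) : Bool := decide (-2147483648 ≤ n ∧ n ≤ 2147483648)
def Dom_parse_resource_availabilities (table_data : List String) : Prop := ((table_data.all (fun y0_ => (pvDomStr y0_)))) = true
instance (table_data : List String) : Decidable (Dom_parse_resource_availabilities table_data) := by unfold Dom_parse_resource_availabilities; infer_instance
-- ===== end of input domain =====

-- B drops the per-line dict accumulation: every qualifying line overwrites the same keys, so B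
-- finds the last line with >1 fields and builds the result dict from that single line (alternative).

-- ===== PORT A =====
def parse_resource_availabilities (table_data : List String) : List (String × Int) :=
  match table_data with
  | [] => []  -- table_data[0] raises IndexError in Python; excluded by Pre_
  | first :: rest =>
    let headers := (PySem.Str.split? first "  ").getD []
    (rest.foldl (fun resources line =>
      let parts := PySem.Str.split₀ line
      if parts.length > 1 then
        (PySem.List.pyRange 0 headers.length 1).foldl (fun resources i =>
          if PySem.Str.startswith (PySem.List.pyGetD headers i "") "R" then
            let resource_name := PySem.List.pyGetD headers i ""
            -- int(parts[i]): ofStr? none = ValueError, out-of-range = IndexError; both excluded by Pre_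
            let resource_amount := (PySem.Int.ofStr? (PySem.List.pyGetD parts i "")).getD 0
            resources.insert (PySem.Str.replace resource_name " " "") resource_amount
          else resources) resources
      else resources) (PySem.Dict.empty : PySem.Dict String Int)).items

-- ===== PORT B =====
def parse_resource_availabilities_alt (table_data : List String) : List (String × Int) :=
  match table_data with
  | [] => []  -- table_data[0] raises IndexError in Python; excluded by Pre_
  | first :: rest =>
    let headers := (PySem.Str.split? first "  ").getD []
    let last := rest.foldl (fun last line =>
      let parts := PySem.Str.split₀ line
      if parts.length > 1 then some parts else last) (none : Option (List String))
    match last with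
    | none => []
    | some parts =>
      -- dict comprehension over enumerate(headers): insert in order
      ((PySem.List.enumerate headers).foldl (fun d p =>
        if PySem.Str.startswith p.2 "R" then
          -- int(last[i]): ofStr? none = ValueError, out-of-range = IndexError; both excluded by Pre_
          d.insert (PySem.Str.replace p.2 " " "")
            ((PySem.Int.ofStr? (PySem.List.pyGetD parts p.1 "")).getD 0)
        else d) (PySem.Dict.empty : PySem.Dict String Int)).items

-- ===== PRECONDITION & SPEC =====
-- Pre_: table_data nonempty (else IndexError), and on every data line with more than one
-- whitespace-separated field, every R-header position is a valid index into the fields and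
-- that field parses as a Python int (else IndexError / ValueError).
def Pre_parse_resource_availabilities (table_data : List String) : Prop :=
  table_data ≠ [] ∧
  ∀ line ∈ table_data.tail,
    (PySem.Str.split₀ line).length > 1 →
    ∀ i < ((PySem.Str.split? (table_data.headD "") "  ").getD []).length,
      PySem.Str.startswith (((PySem.Str.split? (table_data.headD "") "  ").getD []).getD i "") "R" = true →
      i < (PySem.Str.split₀ line).length ∧
      (PySem.Int.ofStr? ((PySem.Str.split₀ line).getD i "")).isSome = true
instance (table_data : List String) : Decidable (Pre_parse_resource_availabilities table_data) := by
  unfold Pre_parse_resource_availabilities; infer_instance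

def pvWitness_parse_resource_availabilities : List String := ["R 1  R 2  name", "3 4 x", "7 8 y"]

def Spec_parse_resource_availabilities (table_data : List String) (out : List (String × Int)) : Prop := out = parse_resource_availabilities_alt table_data
instance (table_data : List String) (out : List (String × Int)) : Decidable (Spec_parse_resource_availabilities table_data out) := by unfold Spec_parse_resource_availabilities; infer_instance

-- ===== CLAIM (what is proved, stated in full; the proofs are below) =====
def Claim_equal_parse_resource_availabilities : Prop := ∀ (table_data : List String), Dom_parse_resource_availabilities table_data → Pre_parse_resource_availabilities table_data → Spec_parse_resource_availabilities table_data (parse_resource_availabilities table_data)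

-- ===== LEMMAS AND PROOFS =====

-- the shared per-line dict update, written as a fold over the filtered enumerated headers
def pvStep (headers parts : List String) (d : PySem.Dict String Int) : PySem.Dict String Int :=
  ((PySem.List.enumerate headers).filter (fun p => PySem.Str.startswith p.2 "R")).foldl
    (fun d p => d.insert (PySem.Str.replace p.2 " " "")
      ((PySem.Int.ofStr? (PySem.List.pyGetD parts p.1 "")).getD 0)) d

-- updating a set with elements it already has does nothing
theorem pv_set_update_of_mem {α : Type} [BEq α] [LawfulBEq α] :
    ∀ (l : List α) (s : PySem.Set α), (∀ x ∈ l, x ∈ s) → PySem.Set.update s l = s := by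
  intro l
  induction l with
  | nil => intro s _; rfl
  | cons x xs ih =>
    intro s h
    rw [PySem.Set.update_cons, PySem.Set.add_of_mem (h x (by simp))]
    exact ih s (fun y hy => h y (by simp [hy]))

-- getD after a keyed insert loop: the last hit in ks wins, else the base dict answers
theorem pv_getD_insert_loop {α K V : Type} [BEq K] [LawfulBEq K] [DecidableEq K]
    (key : α → K) (v : α → V) :
    ∀ (ks : List α) (d : PySem.Dict K V) (k : K) (d0 : V),
      (ks.foldl (fun d p => d.insert (key p) (v p)) d).getD k d0 =
        match ks.reverse.find? (fun p => key p == k) with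
        | some p => v p
        | none => d.getD k d0 := by
  intro ks
  induction ks using List.reverseRecOn with
  | nil => intro d k d0; rfl
  | append_singleton xs x ih =>
    intro d k d0
    rw [List.foldl_append]
    simp only [List.foldl_cons, List.foldl_nil, List.reverse_append, List.reverse_cons,
      List.reverse_nil, List.nil_append, List.cons_append, List.find?_cons]
    rw [PySem.Dict.getD_insert]
    by_cases hk : k = key x
    · simp [hk]
    · have : (key x == k) = false := by simp [Ne.symm hk]
      simp only [this, if_neg hk]
      exact ih d k d0

-- inserting the same key sequence twice (any two value functions): the first pass is absorbed
theorem pv_insert_twice_aux {α K V : Type} [BEq K] [LawfulBEq K] [DecidableEq K]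
    (ks : List α) (key : α → K) (v1 v2 : α → V) (d0 : V) :
    ks.foldl (fun d p => d.insert (key p) (v2 p))
      (ks.foldl (fun d p => d.insert (key p) (v1 p)) (PySem.Dict.empty : PySem.Dict K V)) =
    ks.foldl (fun d p => d.insert (key p) (v2 p)) (PySem.Dict.empty : PySem.Dict K V) := by
  have hkeys : ∀ (v : α → V),
      (ks.foldl (fun d p => d.insert (key p) (v p)) (PySem.Dict.empty : PySem.Dict K V)).keys =
        PySem.Set.update [] (ks.map key) := by
    intro v
    rw [PySem.Dict.keys_foldl_insert_key (f := fun _ p => v p)]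
    simp [PySem.Dict.keys_empty]
  have hnd1 : (ks.foldl (fun d p => d.insert (key p) (v1 p)) (PySem.Dict.empty : PySem.Dict K V)).keys.Nodup :=
    PySem.Dict.nodup_keys_foldl_insert_key ks key (fun _ p => v1 p) _ (by simp)
  have hndL : (ks.foldl (fun d p => d.insert (key p) (v2 p))
      (ks.foldl (fun d p => d.insert (key p) (v1 p)) (PySem.Dict.empty : PySem.Dict K V))).keys.Nodup :=
    PySem.Dict.nodup_keys_foldl_insert_key ks key (fun _ p => v2 p) _ hnd1
  have hndR : (ks.foldl (fun d p => d.insert (key p) (v2 p)) (PySem.Dict.empty : PySem.Dict K V)).keys.Nodup :=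
    PySem.Dict.nodup_keys_foldl_insert_key ks key (fun _ p => v2 p) _ (by simp)
  have hkL : (ks.foldl (fun d p => d.insert (key p) (v2 p))
      (ks.foldl (fun d p => d.insert (key p) (v1 p)) (PySem.Dict.empty : PySem.Dict K V))).keys =
      PySem.Set.update [] (ks.map key) := by
    rw [PySem.Dict.keys_foldl_insert_key (f := fun _ p => v2 p), hkeys v1]
    apply pv_set_update_of_mem
    intro x hx
    rw [PySem.Set.mem_update]
    right
    exact hx
  -- same keys, same getD at every key that occurs in ks: items coincide
  apply PySem.Dict.ext
  rw [PySem.Dict.items_eq_map_keys _ hndL d0, PySem.Dict.items_eq_map_keys _ hndR d0,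
    hkL, hkeys v2]
  apply List.map_congr_left
  intro k hk
  have hk' : k ∈ ks.map key := by
    rcases (PySem.Set.mem_update _ _ _).mp hk with h | h
    · cases h
    · exact h
  rcases List.mem_map.mp hk' with ⟨p, hp, hpk⟩
  have hfind : (ks.reverse.find? (fun p => key p == k)).isSome := by
    rw [List.find?_isSome]
    exact ⟨p, List.mem_reverse.mpr hp, by simp [hpk]⟩
  rcases Option.isSome_iff_exists.mp hfind with ⟨q, hq⟩
  simp only [pv_getD_insert_loop, hq]

theorem pv_insert_twice {α K V : Type} [BEq K] [LawfulBEq K] [DecidableEq K]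
    (ks : List α) (key : α → K) (v1 v2 : α → V) :
    ks.foldl (fun d p => d.insert (key p) (v2 p))
      (ks.foldl (fun d p => d.insert (key p) (v1 p)) (PySem.Dict.empty : PySem.Dict K V)) =
    ks.foldl (fun d p => d.insert (key p) (v2 p)) (PySem.Dict.empty : PySem.Dict K V) := by
  cases ks with
  | nil => rfl
  | cons a as => exact pv_insert_twice_aux (a :: as) key v1 v2 (v2 a)

-- the double-step absorption, at the pvStep level
theorem pv_step_twice (headers p q : List String) :
    pvStep headers q (pvStep headers p PySem.Dict.empty) = pvStep headers q PySem.Dict.empty := by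
  unfold pvStep
  exact pv_insert_twice ((PySem.List.enumerate headers).filter (fun p => PySem.Str.startswith p.2 "R"))
    (fun p => PySem.Str.replace p.2 " " "")
    (fun r => (PySem.Int.ofStr? (PySem.List.pyGetD p r.1 "")).getD 0)
    (fun r => (PySem.Int.ofStr? (PySem.List.pyGetD q r.1 "")).getD 0)

-- A's inner loop over range(len(headers)) is pvStep
theorem pv_A_inner (headers parts : List String) (d : PySem.Dict String Int) :
    (PySem.List.pyRange 0 headers.length 1).foldl (fun resources i =>
      if PySem.Str.startswith (PySem.List.pyGetD headers i "") "R" then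
        resources.insert (PySem.Str.replace (PySem.List.pyGetD headers i "") " " "")
          ((PySem.Int.ofStr? (PySem.List.pyGetD parts i "")).getD 0)
      else resources) d = pvStep headers parts d := by
  unfold pvStep
  rw [List.foldl_filter, PySem.List.enumerate_eq_map_pyRange (d := ""), List.foldl_map]
  simp only [PySem.List.len]

-- A's fold over the data lines carries exactly the dict built from the last qualifying line
theorem pv_loop (headers : List String) :
    ∀ (lines : List String) (o : Option (List String)),
      (lines.foldl (fun resources line =>
        if (PySem.Str.split₀ line).length > 1 then pvStep headers (PySem.Str.split₀ line) resources
        else resources)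
        (match o with
         | none => (PySem.Dict.empty : PySem.Dict String Int)
         | some parts => pvStep headers parts PySem.Dict.empty))
      = (match lines.foldl (fun last line =>
            if (PySem.Str.split₀ line).length > 1 then some (PySem.Str.split₀ line) else last) o with
         | none => (PySem.Dict.empty : PySem.Dict String Int)
         | some parts => pvStep headers parts PySem.Dict.empty) := by
  intro lines
  induction lines with
  | nil => intro o; rfl
  | cons l ls ih =>
    intro o
    simp only [List.foldl_cons]
    by_cases h : (PySem.Str.split₀ l).length > 1
    · simp only [if_pos h]
      have hstate : pvStep headers (PySem.Str.split₀ l)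
          (match o with
           | none => (PySem.Dict.empty : PySem.Dict String Int)
           | some parts => pvStep headers parts PySem.Dict.empty)
          = pvStep headers (PySem.Str.split₀ l) PySem.Dict.empty := by
        cases o with
        | none => rfl
        | some p => exact pv_step_twice headers p (PySem.Str.split₀ l)
      rw [hstate]
      exact ih (some (PySem.Str.split₀ l))
    · simp only [if_neg h]
      exact ih o

-- ===== VERDICT (by name: the statement is the Claim_ definition above) =====
theorem parse_resource_availabilities_spec : Claim_equal_parse_resource_availabilities := by
  unfold Claim_equal_parse_resource_availabilities
  intro table_data _ _
  unfold Spec_parse_resource_availabilities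
  match table_data with
  | [] => rfl
  | first :: rest =>
    unfold parse_resource_availabilities parse_resource_availabilities_alt
    simp only []
    have hA : (rest.foldl (fun resources line =>
        let parts := PySem.Str.split₀ line
        if parts.length > 1 then
          (PySem.List.pyRange 0 ((PySem.Str.split? first "  ").getD []).length 1).foldl
            (fun resources i =>
              if PySem.Str.startswith (PySem.List.pyGetD ((PySem.Str.split? first "  ").getD []) i "") "R" then
                let resource_name := PySem.List.pyGetD ((PySem.Str.split? first "  ").getD []) i ""
                let resource_amount := (PySem.Int.ofStr? (PySem.List.pyGetD parts i "")).getD 0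
                resources.insert (PySem.Str.replace resource_name " " "") resource_amount
              else resources) resources
        else resources) (PySem.Dict.empty : PySem.Dict String Int))
        = (rest.foldl (fun resources line =>
            if (PySem.Str.split₀ line).length > 1 then
              pvStep ((PySem.Str.split? first "  ").getD []) (PySem.Str.split₀ line) resources
            else resources) (PySem.Dict.empty : PySem.Dict String Int)) := by
      apply congrArg (fun f => List.foldl f (PySem.Dict.empty : PySem.Dict String Int) rest)
      funext resources line
      by_cases h : (PySem.Str.split₀ line).length > 1
      · simp only [if_pos h]
        exact pv_A_inner _ (PySem.Str.split₀ line) resources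
      · simp only [if_neg h]
    rw [hA, pv_loop ((PySem.Str.split? first "  ").getD []) rest none]
    cases hlast : rest.foldl (fun last line =>
        if (PySem.Str.split₀ line).length > 1 then some (PySem.Str.split₀ line) else last)
        (none : Option (List String)) with
    | none =>
      simp only []
      rfl
    | some parts =>
      simp only []
      unfold pvStep
      rw [List.foldl_filter]
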